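-- pv_equiv track=rewrite | github.com/canonical/snapcraft.io | webapp/store/logic.py | get_lowest_available_risk
-- ===== SOURCE A (Python) =====
-- def get_lowest_available_risk(channel_map, track):
--     """Get the lowest available risk for the default track
--
--     :param channel_map: Channel map list
--     :param track: The track of the channel
--
--     :returns: The lowest available risk
--     """
--     risk_order = ["stable", "candidate", "beta", "edge"]
--     lowest_available_risk = None
--     for arch in channel_map:
--         if arch in channel_map and track in channel_map[arch]:
--             releases = channel_map[arch][track]
--             for release in releases:
--                 if not lowest_available_risk:
--                     lowest_available_risk = release["risk"]
--                 else:
--                     risk_index = risk_order.index(release["risk"])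
--                     lowest_index = risk_order.index(lowest_available_risk)
--                     if risk_index < lowest_index:
--                         lowest_available_risk = release["risk"]
--
--     return lowest_available_risk
-- ===== SOURCE B (Python) =====
-- def get_lowest_available_risk(channel_map, track):
--     """Get the lowest available risk for the default track"""
--     present = set()
--     for arch in channel_map:
--         if track in channel_map[arch]:
--             present.update(release["risk"] for release in channel_map[arch][track])
--     for risk in ["stable", "candidate", "beta", "edge"]:
--         if risk in present:
--             return risk
--     return None
-- ===== Notes on version B (the rewrite author's own statement) =====
-- stated objective: alternative
-- what changed: A keeps a running minimum with risk_order.index comparisons while scanning releases; B instead builds a set of risks present for the track in one pass and then walks the fixed priority list ['stable','candidate','beta','edge'] returning the first risk found in the set, so no index lookups or running-min state exist at all.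
-- outside the precondition, e.g. on get_lowest_available_risk({'a': {'t': [{'risk': 'weird'}]}}, 't'): A returns 'weird', B returns None; on get_lowest_available_risk({'a': {'t': [{'risk': ''}]}}, 't'): A returns '', B returns None
import Mathlib
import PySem

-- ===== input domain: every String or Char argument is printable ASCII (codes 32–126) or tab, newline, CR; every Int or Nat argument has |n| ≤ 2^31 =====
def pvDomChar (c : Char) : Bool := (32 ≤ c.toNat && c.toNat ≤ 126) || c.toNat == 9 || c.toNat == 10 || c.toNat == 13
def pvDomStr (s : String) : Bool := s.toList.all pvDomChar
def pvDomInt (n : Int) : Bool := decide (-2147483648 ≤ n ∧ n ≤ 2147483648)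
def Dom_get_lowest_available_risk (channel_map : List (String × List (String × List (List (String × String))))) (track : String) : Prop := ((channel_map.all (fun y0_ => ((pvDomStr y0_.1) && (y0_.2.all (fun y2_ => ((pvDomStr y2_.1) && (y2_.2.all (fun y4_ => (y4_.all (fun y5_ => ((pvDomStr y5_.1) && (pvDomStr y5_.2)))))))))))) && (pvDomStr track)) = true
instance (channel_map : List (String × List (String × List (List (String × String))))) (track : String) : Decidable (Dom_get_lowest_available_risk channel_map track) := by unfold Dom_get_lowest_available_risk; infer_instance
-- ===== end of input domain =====

-- B replaces A's running-minimum loop (falsy-sentinel state, risk_order.index comparisons) by a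
-- two-phase algorithm: build the SET of risks present for the track, then return the first element
-- of the fixed priority list found in that set (alternative decomposition, similar cost).


def riskOrder : List String := ["stable", "candidate", "beta", "edge"]

-- ===== PORT A =====
def get_lowest_available_risk (channel_map : List (String × List (String × List (List (String × String))))) (track : String) : Option String :=
  let d := PySem.Dict.ofList channel_map
  d.keys.foldl (fun lowest_available_risk arch =>
    match d.get? arch with
    | none => lowest_available_risk   -- unreachable: arch is drawn from d.keys
    | some archMapRaw =>
      let archMap := PySem.Dict.ofList archMapRaw
      if d.contains arch && archMap.contains track then
        let releases := archMap.getD track []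
        releases.foldl (fun lowest_available_risk release =>
          let risk := (PySem.Dict.ofList release).getD "risk" ""   -- KeyError excluded by Pre_
          match lowest_available_risk with
          | none => some risk
          | some l =>
            if l == "" then some risk   -- Python's falsy test on the running value
            else
              let risk_index := (PySem.List.index? riskOrder risk).getD 0     -- ValueError excluded by Pre_
              let lowest_index := (PySem.List.index? riskOrder l).getD 0
              if risk_index < lowest_index then some risk else some l) lowest_available_risk
      else lowest_available_risk) none

-- ===== PORT B =====
def get_lowest_available_risk_alt (channel_map : List (String × List (String × List (List (String × String))))) (track : String) : Option String :=
  let d := PySem.Dict.ofList channel_map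
  let present := d.keys.foldl (fun present arch =>
    let archMap := PySem.Dict.ofList ((d.get? arch).getD [])
    if archMap.contains track then
      PySem.Set.update present ((archMap.getD track []).map (fun release => (PySem.Dict.ofList release).getD "risk" ""))
    else present) PySem.Set.empty
  riskOrder.find? (fun risk => PySem.Set.contains present risk)

-- ===== PRECONDITION & SPEC =====
-- Pre_ excludes inputs where the Python A raises (KeyError: a relevant release without a "risk"
-- key; ValueError: risk_order.index on a risk outside risk_order) and the degenerate inputs where
-- every relevant risk reaches A only through the falsy branch, i.e. some relevant risk is missing
-- or outside risk_order — on those A may still return that out-of-order risk while B returns None.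
def Pre_get_lowest_available_risk (channel_map : List (String × List (String × List (List (String × String))))) (track : String) : Prop :=
  ∀ p ∈ (PySem.Dict.ofList channel_map).items, ∀ q ∈ (PySem.Dict.ofList p.2).items,
    q.1 = track → ∀ rel ∈ q.2, ∃ v ∈ riskOrder, (PySem.Dict.ofList rel).get? "risk" = some v
instance (channel_map : List (String × List (String × List (List (String × String))))) (track : String) : Decidable (Pre_get_lowest_available_risk channel_map track) := by unfold Pre_get_lowest_available_risk; infer_instance

def pvWitness_get_lowest_available_risk : (List (String × List (String × List (List (String × String))))) × String :=
  ([("amd64", [("latest", [[("risk", "edge")], [("risk", "stable")]])]),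
    ("arm64", [("latest", [[("risk", "beta")]])])], "latest")

def Spec_get_lowest_available_risk (channel_map : List (String × List (String × List (List (String × String))))) (track : String) (out : Option String) : Prop := out = get_lowest_available_risk_alt channel_map track
instance (channel_map : List (String × List (String × List (List (String × String))))) (track : String) (out : Option String) : Decidable (Spec_get_lowest_available_risk channel_map track out) := by unfold Spec_get_lowest_available_risk; infer_instance

-- ===== CLAIM (what is proved, stated in full; the proofs are below) =====
def Claim_equal_get_lowest_available_risk : Prop := ∀ (channel_map : List (String × List (String × List (List (String × String))))) (track : String), Dom_get_lowest_available_risk channel_map track → Pre_get_lowest_available_risk channel_map track → Spec_get_lowest_available_risk channel_map track (get_lowest_available_risk channel_map track)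

-- ===== LEMMAS AND PROOFS =====

theorem witness_ok : Dom_get_lowest_available_risk pvWitness_get_lowest_available_risk.1 pvWitness_get_lowest_available_risk.2 ∧ Pre_get_lowest_available_risk pvWitness_get_lowest_available_risk.1 pvWitness_get_lowest_available_risk.2 := by decide

-- proof-only helpers: named forms of A's two loop bodies and the flattened risk list
def pvKey (r : String) : Nat := (PySem.List.index? riskOrder r).getD 0

def pvStepA (low : Option String) (r : String) : Option String :=
  match low with
  | none => some r
  | some l => if l == "" then some r else if pvKey r < pvKey l then some r else some l

def pvStepM (low : Option String) (r : String) : Option String :=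
  match low with
  | none => some r
  | some l => if pvKey r < pvKey l then some r else some l

def pvArm (d : PySem.Dict String (List (String × List (List (String × String))))) (track : String) (arch : String) : List String :=
  let archMap := PySem.Dict.ofList ((d.get? arch).getD [])
  if archMap.contains track then
    (archMap.getD track []).map (fun release => (PySem.Dict.ofList release).getD "risk" "")
  else []

def pvBodyA (d : PySem.Dict String (List (String × List (List (String × String))))) (track : String) (low : Option String) (arch : String) : Option String :=
  match d.get? arch with
  | none => low
  | some archMapRaw =>
    let archMap := PySem.Dict.ofList archMapRaw
    if d.contains arch && archMap.contains track then
      (archMap.getD track []).foldl (fun low rel => pvStepA low ((PySem.Dict.ofList rel).getD "risk" "")) low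
    else low

def pvRisks (channel_map : List (String × List (String × List (List (String × String))))) (track : String) : List String :=
  (PySem.Dict.ofList channel_map).keys.flatMap (pvArm (PySem.Dict.ofList channel_map) track)

theorem pvBodyA_eq (d : PySem.Dict String (List (String × List (List (String × String))))) (track arch : String)
    (h : arch ∈ d.keys) (low : Option String) :
    pvBodyA d track low arch = (pvArm d track arch).foldl pvStepA low := by
  have hc : d.contains arch = true := (PySem.Dict.contains_iff_mem_keys d arch).mpr h
  have hs : (d.get? arch).isSome := by
    rw [← PySem.Dict.contains_eq_isSome_get? d arch]; exact hc
  obtain ⟨raw, hraw⟩ := Option.isSome_iff_exists.mp hs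
  unfold pvBodyA pvArm
  rw [hraw, hc]
  simp only [Option.getD_some, Bool.true_and]
  by_cases ht : (PySem.Dict.ofList raw).contains track = true
  · rw [if_pos ht, if_pos ht, List.foldl_map]
  · rw [if_neg ht, if_neg ht, List.foldl_nil]

theorem pv_foldl_flat (f : String → List String)
    (body : Option String → String → Option String) (keys : List String)
    (h : ∀ a ∈ keys, ∀ low, body low a = (f a).foldl pvStepA low) :
    ∀ low, keys.foldl body low = (keys.flatMap f).foldl pvStepA low := by
  induction keys with
  | nil => intro low; simp
  | cons k t ih =>
    intro low
    rw [List.foldl_cons, List.flatMap_cons, List.foldl_append,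
        h k (List.mem_cons_self) low]
    exact ih (fun a ha low => h a (List.mem_cons_of_mem _ ha) low) _

theorem pv_step_eq (risks : List String) (h : ∀ r ∈ risks, r ≠ "") :
    ∀ low : Option String, (∀ l, low = some l → l ≠ "") →
    risks.foldl pvStepA low = risks.foldl pvStepM low := by
  induction risks with
  | nil => intro low _; rfl
  | cons r t ih =>
    intro low hlow
    have hr : r ≠ "" := h r (List.mem_cons_self)
    have ht : ∀ x ∈ t, x ≠ "" := fun x hx => h x (List.mem_cons_of_mem _ hx)
    rw [List.foldl_cons, List.foldl_cons]
    have hstep : pvStepA low r = pvStepM low r := by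
      cases low with
      | none => rfl
      | some l =>
        have hl : l ≠ "" := hlow l rfl
        simp [pvStepA, pvStepM, hl]
    rw [hstep]
    apply ih ht
    intro l hl
    have hr' : r ≠ "" := hr
    cases low with
    | none =>
      simp only [pvStepM, Option.some.injEq] at hl
      subst hl; exact hr'
    | some m =>
      have hm : m ≠ "" := hlow m rfl
      simp only [pvStepM] at hl
      split at hl <;> (injection hl with hl; subst hl; first | exact hr' | exact hm)

theorem pv_mem_risks (channel_map : List (String × List (String × List (List (String × String))))) (track : String)
    (hpre : Pre_get_lowest_available_risk channel_map track) :
    ∀ r ∈ pvRisks channel_map track, r ∈ riskOrder := by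
  intro r hr
  unfold pvRisks at hr
  rw [List.mem_flatMap] at hr
  obtain ⟨arch, harch, hrarm⟩ := hr
  unfold pvArm at hrarm
  set d := PySem.Dict.ofList channel_map with hd
  by_cases ht : (PySem.Dict.ofList ((d.get? arch).getD [])).contains track = true
  · rw [if_pos ht] at hrarm
    rw [List.mem_map] at hrarm
    obtain ⟨rel, hrel, hrisk⟩ := hrarm
    have hc : d.contains arch = true := (PySem.Dict.contains_iff_mem_keys d arch).mpr harch
    have hs : (d.get? arch).isSome := by rw [← PySem.Dict.contains_eq_isSome_get? d arch]; exact hc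
    obtain ⟨raw, hraw⟩ := Option.isSome_iff_exists.mp hs
    rw [hraw] at ht hrel
    simp only [Option.getD_some] at ht hrel
    have hpitem : (arch, raw) ∈ d.items := PySem.Dict.mem_items_of_get?_eq_some d hraw
    have hts : ((PySem.Dict.ofList raw).get? track).isSome := by
      rw [← PySem.Dict.contains_eq_isSome_get? (PySem.Dict.ofList raw) track]; exact ht
    obtain ⟨rels, hrels⟩ := Option.isSome_iff_exists.mp hts
    have hqitem : (track, rels) ∈ (PySem.Dict.ofList raw).items :=
      PySem.Dict.mem_items_of_get?_eq_some _ hrels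
    have hrel' : rel ∈ rels := by
      rwa [PySem.Dict.getD_eq_get?_getD, hrels, Option.getD_some] at hrel
    obtain ⟨v, hv, hget⟩ := hpre (arch, raw) hpitem (track, rels) hqitem rfl rel hrel'
    rw [← hrisk, PySem.Dict.getD_eq_get?_getD, hget, Option.getD_some]
    exact hv
  · rw [if_neg ht] at hrarm
    exact absurd hrarm (List.not_mem_nil)

-- membership in the set B builds = membership in the flattened risk list
theorem pv_mem_present (d : PySem.Dict String (List (String × List (List (String × String))))) (track : String)
    (keys : List String) :
    ∀ (s : PySem.Set String) (x : String),
      (x ∈ keys.foldl (fun present arch =>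
        let archMap := PySem.Dict.ofList ((d.get? arch).getD [])
        if archMap.contains track then
          PySem.Set.update present ((archMap.getD track []).map (fun release => (PySem.Dict.ofList release).getD "risk" ""))
        else present) s)
      ↔ (x ∈ s ∨ x ∈ keys.flatMap (pvArm d track)) := by
  induction keys with
  | nil => intro s x; simp
  | cons k t ih =>
    intro s x
    rw [List.foldl_cons, List.flatMap_cons, ih]
    simp only [List.mem_append]
    constructor
    · rintro (hs | ht)
      · unfold pvArm
        by_cases hk : (PySem.Dict.ofList ((d.get? k).getD [])).contains track = true
        · simp only [hk, if_pos] at hs ⊢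
          rw [PySem.Set.mem_update] at hs
          tauto
        · simp only [hk] at hs ⊢
          simp only [if_neg, Bool.false_eq_true, not_false_iff] at hs ⊢
          tauto
      · tauto
    · intro h
      unfold pvArm at h
      by_cases hk : (PySem.Dict.ofList ((d.get? k).getD [])).contains track = true
      · simp only [hk, if_pos] at h ⊢
        rw [PySem.Set.mem_update]
        tauto
      · simp only [hk] at h ⊢
        simp only [if_neg, Bool.false_eq_true, not_false_iff] at h ⊢
        tauto

-- A's running minimum (on risks all drawn from riskOrder) = first priority-list element present
theorem pv_min_eq_find (risks : List String) (h : ∀ r ∈ risks, r ∈ riskOrder) :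
    risks.foldl pvStepM none = riskOrder.find? (fun x => decide (x ∈ risks)) := by
  suffices H : ∀ (risks : List String), (∀ r ∈ risks, r ∈ riskOrder) →
      ∀ (acc : Option String), (∀ l, acc = some l → l ∈ riskOrder) →
      risks.foldl pvStepM acc
        = riskOrder.find? (fun x => decide (acc = some x) || decide (x ∈ risks)) by
    rw [H risks h none (fun l hl => by cases hl)]
    congr 1
  intro risks
  induction risks with
  | nil =>
    intro _ acc hacc
    cases acc with
    | none => decide
    | some l =>
      have hl := hacc l rfl
      rw [List.foldl_nil]
      fin_cases hl <;> decide
  | cons r t ih =>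
    intro h acc hacc
    have hr : r ∈ riskOrder := h r (List.mem_cons_self)
    have ht : ∀ x ∈ t, x ∈ riskOrder := fun x hx => h x (List.mem_cons_of_mem _ hx)
    rw [List.foldl_cons]
    have hacc' : ∀ l, pvStepM acc r = some l → l ∈ riskOrder := by
      intro l hl
      cases acc with
      | none => simp only [pvStepM, Option.some.injEq] at hl; subst hl; exact hr
      | some m =>
        have hm := hacc m rfl
        simp only [pvStepM] at hl
        split at hl <;> (injection hl with hl; subst hl; first | exact hr | exact hm)
    rw [ih ht _ hacc']
    -- reduce to a finite check over the priority list
    cases acc with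
    | none =>
      have : pvStepM none r = some r := rfl
      rw [this]
      fin_cases hr <;>
        · simp only [riskOrder, List.find?]
          by_cases h1 : "stable" ∈ t <;> by_cases h2 : "candidate" ∈ t <;>
            by_cases h3 : "beta" ∈ t <;> by_cases h4 : "edge" ∈ t <;>
            simp [h1, h2, h3, h4, List.mem_cons]
    | some m =>
      have hm := hacc m rfl
      fin_cases hr <;> fin_cases hm <;>
        · simp only [pvStepM, pvKey, riskOrder, PySem.List.index?]
          simp only [List.find?]
          by_cases h1 : "stable" ∈ t <;> by_cases h2 : "candidate" ∈ t <;>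
            by_cases h3 : "beta" ∈ t <;> by_cases h4 : "edge" ∈ t <;>
            simp [h1, h2, h3, h4, List.mem_cons] <;> decide

-- ===== VERDICT (by name: the statement is the Claim_ definition above) =====
theorem get_lowest_available_risk_spec : Claim_equal_get_lowest_available_risk := by
  intro cm track hdom hpre
  unfold Spec_get_lowest_available_risk
  have hA : get_lowest_available_risk cm track
      = ((PySem.Dict.ofList cm).keys).foldl (pvBodyA (PySem.Dict.ofList cm) track) none := rfl
  rw [hA,
      pv_foldl_flat (pvArm (PySem.Dict.ofList cm) track) _ _
        (fun a ha low => pvBodyA_eq _ track a ha low)]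
  have hmem := pv_mem_risks cm track hpre
  have hne : ∀ r ∈ pvRisks cm track, r ≠ "" := by
    intro r hr
    have h := hmem r hr
    simp only [riskOrder, List.mem_cons, List.not_mem_nil, or_false] at h
    rcases h with rfl | rfl | rfl | rfl <;> decide
  rw [show List.flatMap (pvArm (PySem.Dict.ofList cm) track) (PySem.Dict.ofList cm).keys
        = pvRisks cm track from rfl,
      pv_step_eq _ hne none (fun l h => by cases h),
      pv_min_eq_find _ hmem]
  show riskOrder.find? (fun x => decide (x ∈ pvRisks cm track)) = get_lowest_available_risk_alt cm track
  unfold get_lowest_available_risk_alt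
  congr 1
  funext x
  rw [PySem.Set.contains_eq_listContains, Bool.eq_iff_iff]
  simp only [decide_eq_true_eq, List.contains_iff_mem]
  rw [pv_mem_present (PySem.Dict.ofList cm) track ((PySem.Dict.ofList cm).keys) PySem.Set.empty x]
  simp [pvRisks, PySem.Set.empty]
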